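-- pv_equiv track=rewrite | github.com/Jason10293/github-job-scraper | internship_scraper.py | extract_job_info
-- ===== SOURCE A (Python) =====
-- def extract_job_info(line):
--     """Extract company, role, location, and date from markdown table line"""
--     # Remove markdown table separators
--     parts = [p.strip() for p in line.split('|') if p.strip()]
--
--     info = {
--         'company': 'Unknown',
--         'role': 'Unknown',
--         'location': 'Unknown',
--         'date_posted': 'Unknown',
--         'link': ''
--     }
--
--     # Try to extract company name (usually has a link)
--     for part in parts:
--         if '[' in part and ']' in part and 'http' in part:
--             # Extract text between [ and ]
--             company_match = part.split('[')[1].split(']')[0] if '[' in part else ''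
--             if company_match and not any(x in company_match.lower() for x in ['apply', 'link', 'posting']):
--                 info['company'] = company_match
--                 break
--
--     # Try to extract role (look for common role keywords)
--     for part in parts:
--         if any(keyword in part.lower() for keyword in ['intern', 'engineer', 'developer', 'software', 'swe', 'co-op']):
--             info['role'] = part.replace('[', '').replace(']', '').split('(')[0].strip()
--             break
--
--     # Try to extract location (look for Canadian cities or provinces)
--     canadian_locations = [
--         'toronto', 'vancouver', 'montreal', 'ottawa', 'calgary', 'edmonton',
--         'winnipeg', 'quebec', 'hamilton', 'kitchener', 'waterloo', 'london',
--         'victoria', 'halifax', 'regina', 'saskatoon', 'ontario', 'bc',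
--         'british columbia', 'alberta', 'quebec', 'remote', 'hybrid', 'canada'
--     ]
--     for part in parts:
--         part_lower = part.lower()
--         if any(loc in part_lower for loc in canadian_locations):
--             # Clean up the location
--             location = part.replace('[', '').replace(']', '').split('(')[0].strip()
--             if location and len(location) < 50:  # Avoid capturing long text
--                 info['location'] = location
--                 break
--
--     # Try to extract date (look for date formats)
--     for part in parts:
--         if any(month in part for month in ['Jan', 'Feb', 'Mar', 'Apr', 'May', 'Jun', 'Jul', 'Aug', 'Sep', 'Oct', 'Nov', 'Dec']) or '/' in part or '-' in part:
--             info['date_posted'] = part.strip()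
--             break
--
--     # Extract first link found
--     if 'http' in line:
--         link_start = line.find('http')
--         link_end = line.find(')', link_start)
--         if link_end == -1:
--             link_end = line.find(' ', link_start)
--         if link_end == -1:
--             link_end = len(line)
--         info['link'] = line[link_start:link_end].strip()
--
--     return info
-- ===== SOURCE B (Python) =====
-- CANADIAN_LOCATIONS = (
--     'toronto', 'vancouver', 'montreal', 'ottawa', 'calgary', 'edmonton',
--     'winnipeg', 'quebec', 'hamilton', 'kitchener', 'waterloo', 'london',
--     'victoria', 'halifax', 'regina', 'saskatoon', 'ontario', 'bc',
--     'british columbia', 'alberta', 'quebec', 'remote', 'hybrid', 'canada'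
-- )
--
-- ROLE_KEYWORDS = ('intern', 'engineer', 'developer', 'software', 'swe', 'co-op')
--
-- MONTHS = ('Jan', 'Feb', 'Mar', 'Apr', 'May', 'Jun',
--           'Jul', 'Aug', 'Sep', 'Oct', 'Nov', 'Dec')
--
--
-- def _extract_link(line):
--     """First link in the line, exactly as a markdown '(url)' or space-delimited url."""
--     if 'http' not in line:
--         return ''
--     start = line.find('http')
--     end = line.find(')', start)
--     if end == -1:
--         end = line.find(' ', start)
--     if end == -1:
--         end = len(line)
--     return line[start:end].strip()
--
--
-- def extract_job_info(line):
--     """Extract company, role, location, and date from markdown table line."""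
--     parts = [p.strip() for p in line.split('|') if p.strip()]
--
--     company = role = location = date_posted = None
--
--     # single pass: fill each still-empty field with its first matching part
--     for part in parts:
--         low = part.lower()
--
--         if company is None and '[' in part and ']' in part and 'http' in part:
--             candidate = part.split('[')[1].split(']')[0]
--             if candidate and not any(x in candidate.lower() for x in ('apply', 'link', 'posting')):
--                 company = candidate
--
--         if role is None and any(k in low for k in ROLE_KEYWORDS):
--             role = part.replace('[', '').replace(']', '').split('(')[0].strip()
--
--         if location is None and any(loc in low for loc in CANADIAN_LOCATIONS):
--             cleaned = part.replace('[', '').replace(']', '').split('(')[0].strip()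
--             if cleaned and len(cleaned) < 50:
--                 location = cleaned
--
--         if date_posted is None and (any(m in part for m in MONTHS) or '/' in part or '-' in part):
--             date_posted = part.strip()
--
--     return {
--         'company': company if company is not None else 'Unknown',
--         'role': role if role is not None else 'Unknown',
--         'location': location if location is not None else 'Unknown',
--         'date_posted': date_posted if date_posted is not None else 'Unknown',
--         'link': _extract_link(line),
--     }
-- ===== Notes on version B (the rewrite author's own statement) =====
-- stated objective: alternative
-- what changed: A scans the parts list four separate times (one loop per field, each breaking at its first match); B makes a single pass over parts keeping an Option slot per field and fills each still-empty slot with its first matching part, with the link extracted by the same find-based block factored into a helper.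
import Mathlib
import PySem

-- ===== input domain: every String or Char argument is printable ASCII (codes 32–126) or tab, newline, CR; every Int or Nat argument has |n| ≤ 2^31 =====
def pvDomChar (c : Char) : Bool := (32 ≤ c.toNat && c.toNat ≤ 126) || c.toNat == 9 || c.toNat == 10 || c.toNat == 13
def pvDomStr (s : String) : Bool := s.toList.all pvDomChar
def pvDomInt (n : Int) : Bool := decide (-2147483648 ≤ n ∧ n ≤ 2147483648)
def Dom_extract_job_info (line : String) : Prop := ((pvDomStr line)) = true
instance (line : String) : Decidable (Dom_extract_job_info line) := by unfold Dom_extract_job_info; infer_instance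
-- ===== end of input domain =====

-- B replaces A's four sequential scans of `parts` by a single pass that fills each
-- still-empty field with its first matching part (objective: alternative decomposition).

-- shared data constants (verbatim from the Python sources)
def pvCanadianLocations : List String :=
  ["toronto", "vancouver", "montreal", "ottawa", "calgary", "edmonton",
   "winnipeg", "quebec", "hamilton", "kitchener", "waterloo", "london",
   "victoria", "halifax", "regina", "saskatoon", "ontario", "bc",
   "british columbia", "alberta", "quebec", "remote", "hybrid", "canada"]

def pvRoleKeywords : List String := ["intern", "engineer", "developer", "software", "swe", "co-op"]

def pvMonths : List String :=
  ["Jan", "Feb", "Mar", "Apr", "May", "Jun", "Jul", "Aug", "Sep", "Oct", "Nov", "Dec"]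

-- ===== PORT A =====
-- 'part.split("[")[1].split("]")[0]': the enclosing guard '[' in part makes index 1 in range,
-- and split results are nonempty so index 0 is in range; pyGet?'s none branch (IndexError) is unreachable.
def pvA_companyLoop : List String → PySem.Dict String String → PySem.Dict String String
  | [], info => info
  | part :: rest, info =>
    if PySem.Str.isIn "[" part && PySem.Str.isIn "]" part && PySem.Str.isIn "http" part then
      let company_match :=
        if PySem.Str.isIn "[" part then
          (PySem.List.pyGet? ((PySem.Str.split?
            ((PySem.List.pyGet? ((PySem.Str.split? part "[").getD []) 1).getD "") "]").getD []) 0).getD ""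
        else ""
      if company_match != "" &&
          !(PySem.Str.isIn "apply" (PySem.Str.lower company_match) ||
            PySem.Str.isIn "link" (PySem.Str.lower company_match) ||
            PySem.Str.isIn "posting" (PySem.Str.lower company_match)) then
        info.insert "company" company_match
      else pvA_companyLoop rest info
    else pvA_companyLoop rest info

def pvA_roleLoop : List String → PySem.Dict String String → PySem.Dict String String
  | [], info => info
  | part :: rest, info =>
    if pvRoleKeywords.any (fun k => PySem.Str.isIn k (PySem.Str.lower part)) then
      info.insert "role"
        (PySem.Str.strip ((PySem.List.pyGet? ((PySem.Str.split?
          (PySem.Str.replace (PySem.Str.replace part "[" "") "]" "") "(").getD []) 0).getD ""))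
    else pvA_roleLoop rest info

def pvA_locationLoop : List String → PySem.Dict String String → PySem.Dict String String
  | [], info => info
  | part :: rest, info =>
    let part_lower := PySem.Str.lower part
    if pvCanadianLocations.any (fun loc => PySem.Str.isIn loc part_lower) then
      let location :=
        PySem.Str.strip ((PySem.List.pyGet? ((PySem.Str.split?
          (PySem.Str.replace (PySem.Str.replace part "[" "") "]" "") "(").getD []) 0).getD "")
      if location != "" && PySem.Str.len location < 50 then
        info.insert "location" location
      else pvA_locationLoop rest info
    else pvA_locationLoop rest info

def pvA_dateLoop : List String → PySem.Dict String String → PySem.Dict String String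
  | [], info => info
  | part :: rest, info =>
    if pvMonths.any (fun m => PySem.Str.isIn m part) || PySem.Str.isIn "/" part || PySem.Str.isIn "-" part then
      info.insert "date_posted" (PySem.Str.strip part)
    else pvA_dateLoop rest info

def extract_job_info (line : String) : List (String × String) :=
  let parts := (((PySem.Str.split? line "|").getD []).filter
    (fun p => PySem.Str.strip p != "")).map PySem.Str.strip
  let info : PySem.Dict String String := PySem.Dict.mk
    [("company", "Unknown"), ("role", "Unknown"), ("location", "Unknown"),
     ("date_posted", "Unknown"), ("link", "")]
  let info := pvA_companyLoop parts info
  let info := pvA_roleLoop parts info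
  let info := pvA_locationLoop parts info
  let info := pvA_dateLoop parts info
  let info :=
    if PySem.Str.isIn "http" line then
      let link_start := PySem.Str.find line "http"
      let link_end := PySem.Str.findFrom line ")" link_start
      let link_end := if link_end == -1 then PySem.Str.findFrom line " " link_start else link_end
      let link_end := if link_end == -1 then PySem.Str.len line else link_end
      info.insert "link" (PySem.Str.strip (PySem.Str.slice line (some link_start) (some link_end)))
    else info
  info.items

-- ===== PORT B =====
def pvB_extractLink (line : String) : String :=
  if !(PySem.Str.isIn "http" line) then ""
  else
    let start := PySem.Str.find line "http"
    let stop := PySem.Str.findFrom line ")" start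
    let stop := if stop == -1 then PySem.Str.findFrom line " " start else stop
    let stop := if stop == -1 then PySem.Str.len line else stop
    PySem.Str.strip (PySem.Str.slice line (some start) (some stop))

-- single pass over parts: four Option slots, each filled by its first matching part
def pvB_loop : List String → Option String → Option String → Option String → Option String →
    Option String × Option String × Option String × Option String
  | [], c, r, l, d => (c, r, l, d)
  | part :: rest, c, r, l, d =>
    let low := PySem.Str.lower part
    let c :=
      if c.isNone && (PySem.Str.isIn "[" part && PySem.Str.isIn "]" part && PySem.Str.isIn "http" part) then
        let candidate :=
          (PySem.List.pyGet? ((PySem.Str.split?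
            ((PySem.List.pyGet? ((PySem.Str.split? part "[").getD []) 1).getD "") "]").getD []) 0).getD ""
        if candidate != "" &&
            !(PySem.Str.isIn "apply" (PySem.Str.lower candidate) ||
              PySem.Str.isIn "link" (PySem.Str.lower candidate) ||
              PySem.Str.isIn "posting" (PySem.Str.lower candidate)) then
          some candidate
        else c
      else c
    let r :=
      if r.isNone && pvRoleKeywords.any (fun k => PySem.Str.isIn k low) then
        some (PySem.Str.strip ((PySem.List.pyGet? ((PySem.Str.split?
          (PySem.Str.replace (PySem.Str.replace part "[" "") "]" "") "(").getD []) 0).getD ""))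
      else r
    let l :=
      if l.isNone && pvCanadianLocations.any (fun loc => PySem.Str.isIn loc low) then
        let cleaned :=
          PySem.Str.strip ((PySem.List.pyGet? ((PySem.Str.split?
            (PySem.Str.replace (PySem.Str.replace part "[" "") "]" "") "(").getD []) 0).getD "")
        if cleaned != "" && PySem.Str.len cleaned < 50 then some cleaned else l
      else l
    let d :=
      if d.isNone && (pvMonths.any (fun m => PySem.Str.isIn m part) ||
          PySem.Str.isIn "/" part || PySem.Str.isIn "-" part) then
        some (PySem.Str.strip part)
      else d
    pvB_loop rest c r l d

def extract_job_info_alt (line : String) : List (String × String) :=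
  let parts := (((PySem.Str.split? line "|").getD []).filter
    (fun p => PySem.Str.strip p != "")).map PySem.Str.strip
  let res := pvB_loop parts none none none none
  [("company", res.1.getD "Unknown"),
   ("role", res.2.1.getD "Unknown"),
   ("location", res.2.2.1.getD "Unknown"),
   ("date_posted", res.2.2.2.getD "Unknown"),
   ("link", pvB_extractLink line)]

-- ===== PRECONDITION & SPEC =====
def Spec_extract_job_info (line : String) (out : List (String × String)) : Prop := out = extract_job_info_alt line
instance (line : String) (out : List (String × String)) : Decidable (Spec_extract_job_info line out) := by unfold Spec_extract_job_info; infer_instance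

-- ===== CLAIM (what is proved, stated in full; the proofs are below) =====
def Claim_equal_extract_job_info : Prop := ∀ (line : String), Dom_extract_job_info line → Spec_extract_job_info line (extract_job_info line)

-- ===== LEMMAS AND PROOFS =====

-- first-match searches, one per field (proof-side characterisation of both programs)
def pvFindC : List String → Option String
  | [] => none
  | part :: rest =>
    if PySem.Str.isIn "[" part && PySem.Str.isIn "]" part && PySem.Str.isIn "http" part then
      let candidate :=
        (PySem.List.pyGet? ((PySem.Str.split?
          ((PySem.List.pyGet? ((PySem.Str.split? part "[").getD []) 1).getD "") "]").getD []) 0).getD ""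
      if candidate != "" &&
          !(PySem.Str.isIn "apply" (PySem.Str.lower candidate) ||
            PySem.Str.isIn "link" (PySem.Str.lower candidate) ||
            PySem.Str.isIn "posting" (PySem.Str.lower candidate)) then
        some candidate
      else pvFindC rest
    else pvFindC rest

def pvFindR : List String → Option String
  | [] => none
  | part :: rest =>
    if pvRoleKeywords.any (fun k => PySem.Str.isIn k (PySem.Str.lower part)) then
      some (PySem.Str.strip ((PySem.List.pyGet? ((PySem.Str.split?
        (PySem.Str.replace (PySem.Str.replace part "[" "") "]" "") "(").getD []) 0).getD ""))
    else pvFindR rest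

def pvFindL : List String → Option String
  | [] => none
  | part :: rest =>
    if pvCanadianLocations.any (fun loc => PySem.Str.isIn loc (PySem.Str.lower part)) then
      let cleaned :=
        PySem.Str.strip ((PySem.List.pyGet? ((PySem.Str.split?
          (PySem.Str.replace (PySem.Str.replace part "[" "") "]" "") "(").getD []) 0).getD "")
      if cleaned != "" && PySem.Str.len cleaned < 50 then some cleaned else pvFindL rest
    else pvFindL rest

def pvFindD : List String → Option String
  | [] => none
  | part :: rest =>
    if pvMonths.any (fun m => PySem.Str.isIn m part) || PySem.Str.isIn "/" part || PySem.Str.isIn "-" part then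
      some (PySem.Str.strip part)
    else pvFindD rest

theorem pvA_companyLoop_eq (parts : List String) (info : PySem.Dict String String) :
    pvA_companyLoop parts info = (pvFindC parts).elim info (fun v => info.insert "company" v) := by
  induction parts with
  | nil => rfl
  | cons part rest ih =>
    simp only [pvA_companyLoop, pvFindC]
    by_cases h1 : (PySem.Str.isIn "[" part && PySem.Str.isIn "]" part && PySem.Str.isIn "http" part) = true
    · have hb : PySem.Str.isIn "[" part = true := by
        rw [Bool.and_eq_true, Bool.and_eq_true] at h1; exact h1.1.1
      rw [if_pos h1, if_pos h1, if_pos hb]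
      split_ifs with h2
      · rfl
      · exact ih
    · rw [if_neg h1, if_neg h1]; exact ih

theorem pvA_roleLoop_eq (parts : List String) (info : PySem.Dict String String) :
    pvA_roleLoop parts info = (pvFindR parts).elim info (fun v => info.insert "role" v) := by
  induction parts with
  | nil => rfl
  | cons part rest ih =>
    simp only [pvA_roleLoop, pvFindR]
    split_ifs with h1
    · rfl
    · exact ih

theorem pvA_locationLoop_eq (parts : List String) (info : PySem.Dict String String) :
    pvA_locationLoop parts info = (pvFindL parts).elim info (fun v => info.insert "location" v) := by
  induction parts with
  | nil => rfl
  | cons part rest ih =>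
    simp only [pvA_locationLoop, pvFindL]
    split_ifs with h1 h2
    · rfl
    · exact ih
    · exact ih

theorem pvA_dateLoop_eq (parts : List String) (info : PySem.Dict String String) :
    pvA_dateLoop parts info = (pvFindD parts).elim info (fun v => info.insert "date_posted" v) := by
  induction parts with
  | nil => rfl
  | cons part rest ih =>
    simp only [pvA_dateLoop, pvFindD]
    split_ifs with h1
    · rfl
    · exact ih

theorem pvB_loop_eq (parts : List String) (c r l d : Option String) :
    pvB_loop parts c r l d =
      (c.or (pvFindC parts), r.or (pvFindR parts), l.or (pvFindL parts), d.or (pvFindD parts)) := by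
  induction parts generalizing c r l d with
  | nil =>
    simp only [pvB_loop, pvFindC, pvFindR, pvFindL, pvFindD, Option.or_none]
  | cons part rest ih =>
    rw [pvB_loop, ih]
    simp only [Prod.mk.injEq]
    refine ⟨?_, ?_, ?_, ?_⟩
    · cases c with
      | some a => simp
      | none =>
        simp only [Option.isNone_none, Bool.true_and, pvFindC]
        split_ifs <;> simp only [Option.some_or, Option.none_or]
    · cases r with
      | some a => simp
      | none =>
        simp only [Option.isNone_none, Bool.true_and, pvFindR]
        split_ifs <;> simp only [Option.some_or, Option.none_or]
    · cases l with
      | some a => simp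
      | none =>
        simp only [Option.isNone_none, Bool.true_and, pvFindL]
        split_ifs <;> simp only [Option.some_or, Option.none_or]
    · cases d with
      | some a => simp
      | none =>
        simp only [Option.isNone_none, Bool.true_and, pvFindD]
        split_ifs <;> simp only [Option.some_or, Option.none_or]

-- ===== VERDICT (by name: the statement is the Claim_ definition above) =====
set_option maxHeartbeats 1000000 in
theorem extract_job_info_spec : Claim_equal_extract_job_info := by
  intro line _
  show extract_job_info line = extract_job_info_alt line
  unfold extract_job_info extract_job_info_alt
  simp only [pvA_companyLoop_eq, pvA_roleLoop_eq, pvA_locationLoop_eq, pvA_dateLoop_eq,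
    pvB_loop_eq, pvB_extractLink]
  generalize hC : pvFindC (((( PySem.Str.split? line "|").getD []).filter (fun p => PySem.Str.strip p != "")).map PySem.Str.strip) = oc
  generalize hR : pvFindR (((( PySem.Str.split? line "|").getD []).filter (fun p => PySem.Str.strip p != "")).map PySem.Str.strip) = orr
  generalize hL : pvFindL (((( PySem.Str.split? line "|").getD []).filter (fun p => PySem.Str.strip p != "")).map PySem.Str.strip) = ol
  generalize hD : pvFindD (((( PySem.Str.split? line "|").getD []).filter (fun p => PySem.Str.strip p != "")).map PySem.Str.strip) = od
  clear hC hR hL hD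
  rcases oc with _ | vc <;> rcases orr with _ | vr <;> rcases ol with _ | vl <;> rcases od with _ | vd <;>
    simp only [Option.elim, Option.none_or, Option.getD_some, Option.getD_none] <;>
    simp [PySem.Dict.insert] <;>
    rcases Bool.eq_false_or_eq_true (PySem.Chars.isIn ['h', 't', 't', 'p'] line.toList) with hH | hH <;>
    simp [hH]
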